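-- pv_equiv track=rewrite | github.com/kogulko/hackerrank | hour_rank_30/video-conference.py | solve
-- ===== SOURCE A (Python) =====
-- from collections import defaultdict
--
-- def solve(names):
--     ans = []
--     prefixes = defaultdict(int)
--     uniq_names = defaultdict(int)
--     for name in names:
--         if uniq_names[name] > 0:
--             ans.append(' '.join([name, str(uniq_names[name] + 1)]))
--         uniq_names[name] += 1
--         for i in range(len(name) - 1, 0, -1):
--             prefix = name[:(len(name) - i)]
--             if prefixes[prefix] == 0:
--                 ans.append(prefix)
--             prefixes[prefix] += 1
--     return ans
-- ===== SOURCE B (Python) =====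
-- def solve(names):
--     # Exploits that the set of already-seen proper prefixes is closed under
--     # taking prefixes: per name, scan forward to the first unseen prefix
--     # length m, then every longer proper prefix is new too, so emit the
--     # whole tail [m, len) in one bulk pass and record only the new ones.
--     ans = []
--     counts = {}
--     seen = set()
--     for name in names:
--         c = counts.get(name, 0)
--         if c:
--             ans.append(name + ' ' + str(c + 1))
--         counts[name] = c + 1
--         L = len(name)
--         m = 1
--         while m < L and name[:m] in seen:
--             m += 1
--         for k in range(m, L):
--             p = name[:k]
--             ans.append(p)
--             seen.add(p)
--     return ans
-- ===== Notes on version B (the rewrite author's own statement) =====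
-- stated objective: alternative
-- what changed: Replaces the per-prefix counting dict and per-prefix conditional emission with a seen-prefix set plus the prefix-closure insight: scan each name forward to the first unseen prefix length, then bulk-emit and record exactly the tail of longer prefixes, inserting only new prefixes instead of incrementing a counter for every prefix of every name.
import Mathlib
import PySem

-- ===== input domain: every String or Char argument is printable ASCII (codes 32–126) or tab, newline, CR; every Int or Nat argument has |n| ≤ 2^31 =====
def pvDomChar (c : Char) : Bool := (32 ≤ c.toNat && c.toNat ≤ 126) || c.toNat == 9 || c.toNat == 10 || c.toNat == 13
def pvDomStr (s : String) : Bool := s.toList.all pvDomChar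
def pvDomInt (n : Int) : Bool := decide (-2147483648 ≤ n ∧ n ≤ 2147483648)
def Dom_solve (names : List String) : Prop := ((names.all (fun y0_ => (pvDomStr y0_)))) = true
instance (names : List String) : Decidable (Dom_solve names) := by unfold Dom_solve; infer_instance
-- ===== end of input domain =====

-- B replaces the per-prefix counting dict with a seen-prefix set: since the seen set is
-- prefix-closed, B scans each name to the first unseen prefix length and bulk-emits the tail.


-- ===== PORT A =====
-- one iteration of A's outer loop; state = (ans, prefixes, uniq_names)
def solveAStep (st : List String × PySem.Dict String Int × PySem.Dict String Int)
    (name : String) : List String × PySem.Dict String Int × PySem.Dict String Int :=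
  let c := st.2.2.getD name 0                       -- uniq_names[name] (defaultdict int)
  let ans := if c > 0 then st.1 ++ [PySem.Str.join " " [name, PySem.Int.toStr (c + 1)]] else st.1
  let uniq := st.2.2.insert name (c + 1)            -- uniq_names[name] += 1
  -- for i in range(len(name) - 1, 0, -1): …
  let inner := (PySem.List.pyRange (PySem.Str.len name - 1) 0 (-1)).foldl
    (fun (p : List String × PySem.Dict String Int) i =>
      let pr := PySem.Str.slice name none (some (PySem.Str.len name - i))   -- name[:(len(name)-i)]
      let cnt := p.2.getD pr 0                      -- prefixes[prefix] (defaultdict int)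
      (if cnt == 0 then p.1 ++ [pr] else p.1, p.2.insert pr (cnt + 1)))
    (ans, st.2.1)
  (inner.1, inner.2, uniq)

def solve (names : List String) : List String :=
  (names.foldl solveAStep ([], PySem.Dict.empty, PySem.Dict.empty)).1

-- ===== PORT B =====
-- while m < L and name[:m] in seen: m += 1   (fuel = L - m keeps the 'm < L' test)
def firstMiss (name : String) (seen : PySem.Set String) : Nat → Nat → Nat
  | 0, m => m
  | fuel + 1, m =>
    if PySem.Set.contains seen (PySem.Str.slice name none (some (m : Int))) then
      firstMiss name seen fuel (m + 1)
    else m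

-- one iteration of B's loop; state = (ans, seen, counts)
def solveBStep (st : List String × PySem.Set String × PySem.Dict String Int)
    (name : String) : List String × PySem.Set String × PySem.Dict String Int :=
  let c := st.2.2.getD name 0
  let ans := if c > 0 then st.1 ++ [name ++ " " ++ PySem.Int.toStr (c + 1)] else st.1
  let counts := st.2.2.insert name (c + 1)
  let L := PySem.Str.len name
  let m := firstMiss name st.2.1 (L - 1).toNat 1
  -- for k in range(m, L): ans.append(name[:k]); seen.add(name[:k])
  let inner := (PySem.List.pyRange (m : Int) L 1).foldl
    (fun (q : List String × PySem.Set String) k =>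
      let p := PySem.Str.slice name none (some k)
      (q.1 ++ [p], PySem.Set.add q.2 p))
    (ans, st.2.1)
  (inner.1, inner.2, counts)

def solve_alt (names : List String) : List String :=
  (names.foldl solveBStep ([], PySem.Set.empty, PySem.Dict.empty)).1

-- ===== PRECONDITION & SPEC =====
def Spec_solve (names : List String) (out : List String) : Prop := out = solve_alt names
instance (names : List String) (out : List String) : Decidable (Spec_solve names out) := by unfold Spec_solve; infer_instance

-- ===== CLAIM (what is proved, stated in full; the proofs are below) =====
def Claim_equal_solve : Prop := ∀ (names : List String), Dom_solve names → Spec_solve names (solve names)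

-- ===== LEMMAS AND PROOFS =====

/-- the proper prefix `name[:k]` as a string, seen from the character list -/
def pfx (cs : List Char) (k : Nat) : String := String.ofList (cs.take k)

/-- every string in `seen` has all of its proper prefixes in `seen` too -/
def ClosedSet (seen : PySem.Set String) : Prop :=
  ∀ s ∈ seen, ∀ j, 1 ≤ j → j < s.toList.length → pfx s.toList j ∈ seen

/-- relation between A's prefix-count dict and B's seen-prefix set -/
def InvPS (prefixes : PySem.Dict String Int) (seen : PySem.Set String) : Prop :=
  (∀ s, 0 ≤ prefixes.getD s 0) ∧ (∀ s, 0 < prefixes.getD s 0 ↔ s ∈ seen) ∧ ClosedSet seen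

theorem slice_pfx (name : String) (k : Nat) :
    PySem.Str.slice name none (some (k : Int)) = pfx name.toList k := by
  simp [PySem.Str.slice, pfx, PySem.Chars.slice_eq_listSlice, PySem.List.slice_to_natCast]

theorem join_two (a b : String) : PySem.Str.join " " [a, b] = a ++ " " ++ b := by
  apply String.toList_inj.mp
  simp [PySem.Str.toList_join, PySem.Chars.join_cons_cons, PySem.Chars.join_singleton]

theorem toList_pfx (cs : List Char) (k : Nat) : (pfx cs k).toList = cs.take k := by
  simp [pfx]

theorem pfx_inj (cs : List Char) {j k : Nat} (hj : j < cs.length) (hk : k < cs.length)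
    (h : pfx cs j = pfx cs k) : j = k := by
  have := congrArg (fun s => s.toList.length) h
  simpa [toList_pfx, Nat.le_of_lt hj, Nat.le_of_lt hk] using this

/-- A's inner loop, reindexed over the list of prefix lengths -/
theorem innerA (cs : List Char) : ∀ (ks : List Nat) (ans : List String)
    (prefixes : PySem.Dict String Int),
    (∀ k ∈ ks, 1 ≤ k ∧ k < cs.length) → ks.Nodup →
    (ks.foldl (fun (p : List String × PySem.Dict String Int) k =>
        (if p.2.getD (pfx cs k) 0 == 0 then p.1 ++ [pfx cs k] else p.1,
         p.2.insert (pfx cs k) (p.2.getD (pfx cs k) 0 + 1))) (ans, prefixes)).1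
      = ans ++ ((ks.filter (fun k => prefixes.getD (pfx cs k) 0 == 0)).map (pfx cs)) ∧
    ∀ s, (ks.foldl (fun (p : List String × PySem.Dict String Int) k =>
        (if p.2.getD (pfx cs k) 0 == 0 then p.1 ++ [pfx cs k] else p.1,
         p.2.insert (pfx cs k) (p.2.getD (pfx cs k) 0 + 1))) (ans, prefixes)).2.getD s 0
      = prefixes.getD s 0 + ((ks.map (pfx cs)).count s : Int) := by
  intro ks
  induction ks with
  | nil => intro ans prefixes _ _; simp
  | cons j ks' ih =>
    intro ans prefixes hb hnd
    have hj := hb j (by simp)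
    have hne : ∀ k ∈ ks', pfx cs k ≠ pfx cs j := by
      intro k hk h
      exact (List.nodup_cons.mp hnd).1 (by
        have := pfx_inj cs (hb k (by simp [hk])).2 hj.2 h
        simpa [this] using hk)
    simp only [List.foldl_cons]
    obtain ⟨ihA, ihB⟩ := ih
      (if prefixes.getD (pfx cs j) 0 == 0 then ans ++ [pfx cs j] else ans)
      (prefixes.insert (pfx cs j) (prefixes.getD (pfx cs j) 0 + 1))
      (fun k hk => hb k (by simp [hk])) (List.nodup_cons.mp hnd).2
    constructor
    · rw [ihA, List.filter_congr (q := fun k => prefixes.getD (pfx cs k) 0 == 0)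
        (fun k hk => by rw [PySem.Dict.getD_insert, if_neg (hne k hk)])]
      rw [List.filter_cons]
      by_cases h : prefixes.getD (pfx cs j) 0 == 0 <;>
        simp [h, List.append_assoc]
    · intro s
      rw [ihB s, PySem.Dict.getD_insert, List.map_cons, List.count_cons]
      by_cases h : s = pfx cs j
      · subst h
        rw [if_pos rfl, beq_self_eq_true, if_pos rfl]
        push_cast; ring
      · rw [if_neg h, beq_eq_false_iff_ne.mpr (fun e => h e.symm), if_neg (by simp)]
        push_cast; ring

/-- what `firstMiss` returns: the first unseen prefix length -/
theorem firstMiss_spec (name : String) (seen : PySem.Set String) : ∀ (fuel m : Nat),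
    m ≤ firstMiss name seen fuel m ∧ firstMiss name seen fuel m ≤ m + fuel ∧
    (∀ k, m ≤ k → k < firstMiss name seen fuel m → pfx name.toList k ∈ seen) ∧
    (firstMiss name seen fuel m < m + fuel → pfx name.toList (firstMiss name seen fuel m) ∉ seen) := by
  intro fuel
  induction fuel with
  | zero =>
    intro m
    simp only [firstMiss]
    exact ⟨le_refl m, by omega, fun k h1 h2 => by omega, fun h => by omega⟩
  | succ f ih =>
    intro m
    rw [firstMiss, slice_pfx]
    by_cases hc : PySem.Set.contains seen (pfx name.toList m) = true
    · rw [if_pos hc]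
      obtain ⟨h1, h2, h3, h4⟩ := ih (m + 1)
      refine ⟨by omega, by omega, fun k hk1 hk2 => ?_, fun h => h4 (by omega)⟩
      rcases Nat.eq_or_lt_of_le hk1 with he | hl
      · exact he ▸ (PySem.Set.contains_iff seen _).mp hc
      · exact h3 k hl hk2
    · rw [if_neg hc]
      exact ⟨le_refl m, by omega, fun k h1 h2 => by omega,
        fun _ hmem => hc ((PySem.Set.contains_iff seen _).mpr hmem)⟩

/-- A's inner loop over `range(len-1, 0, -1)` is the `innerA` fold over prefix lengths 1..len-1 -/
theorem A_inner_eq (name : String) (ans : List String) (prefixes : PySem.Dict String Int) :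
    (PySem.List.pyRange (PySem.Str.len name - 1) 0 (-1)).foldl
      (fun (p : List String × PySem.Dict String Int) i =>
        let pr := PySem.Str.slice name none (some (PySem.Str.len name - i))
        let cnt := p.2.getD pr 0
        (if cnt == 0 then p.1 ++ [pr] else p.1, p.2.insert pr (cnt + 1))) (ans, prefixes)
    = (List.range' 1 (name.toList.length - 1)).foldl
      (fun (p : List String × PySem.Dict String Int) k =>
        (if p.2.getD (pfx name.toList k) 0 == 0 then p.1 ++ [pfx name.toList k] else p.1,
         p.2.insert (pfx name.toList k) (p.2.getD (pfx name.toList k) 0 + 1))) (ans, prefixes) := by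
  have hlen : PySem.Str.len name = (name.toList.length : Int) := PySem.Str.len_eq name
  have hnt : ((name.toList.length : Int) - 1 - 0).toNat = name.toList.length - 1 := by omega
  rw [hlen, PySem.List.pyRange_neg_one, hnt, List.range'_eq_map_range,
    List.foldl_map, List.foldl_map]
  apply PySem.List.foldl_congr_mem
  intro p t _
  have e2 : (name.toList.length : Int) - ((name.toList.length : Int) - 1 - t)
      = ((1 + t : Nat) : Int) := by push_cast; ring
  simp only [e2, slice_pfx]

/-- B's inner loop appends the prefixes of lengths m..len-1 and adds them to the set -/
theorem B_inner_eq (name : String) (ans : List String) (seen : PySem.Set String) (m : Nat) :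
    (PySem.List.pyRange (m : Int) (PySem.Str.len name) 1).foldl
      (fun (q : List String × PySem.Set String) k =>
        let p := PySem.Str.slice name none (some k)
        (q.1 ++ [p], PySem.Set.add q.2 p)) (ans, seen)
    = (ans ++ (List.range' m (name.toList.length - m)).map (pfx name.toList),
       PySem.Set.update seen ((List.range' m (name.toList.length - m)).map (pfx name.toList))) := by
  have hlen : PySem.Str.len name = (name.toList.length : Int) := PySem.Str.len_eq name
  have hnt : ((name.toList.length : Int) - m).toNat = name.toList.length - m := by omega
  rw [hlen, PySem.List.pyRange_one, hnt, List.foldl_map]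
  have e2 : ∀ (q : List String × PySem.Set String) (t : Nat),
      (let p := PySem.Str.slice name none (some ((m : Int) + t))
       (q.1 ++ [p], PySem.Set.add q.2 p))
      = (q.1 ++ [pfx name.toList (m + t)], PySem.Set.add q.2 (pfx name.toList (m + t))) := by
    intro q t
    have : ((m : Int) + t) = ((m + t : Nat) : Int) := by push_cast; ring
    simp only [this, slice_pfx]
  rw [PySem.List.foldl_congr_mem _ _ _ _ (fun q t _ => e2 q t)]
  rw [PySem.List.foldl_prod_mk (f := fun a t => a ++ [pfx name.toList (m + t)])
      (g := fun s t => PySem.Set.add s (pfx name.toList (m + t)))]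
  rw [PySem.List.foldl_append_singleton_eq_map, ← PySem.Set.update_map_eq_foldl_add]
  simp [List.range'_eq_map_range, Function.comp_def]

/-- one step of the outer loops preserves the simulation relation -/
theorem step_rel (name : String) (ansA ansB : List String)
    (prefixes uniq counts : PySem.Dict String Int) (seen : PySem.Set String)
    (hans : ansA = ansB) (huc : uniq = counts) (hinv : InvPS prefixes seen) :
    (solveAStep (ansA, prefixes, uniq) name).1 = (solveBStep (ansB, seen, counts) name).1 ∧
    (solveAStep (ansA, prefixes, uniq) name).2.2 = (solveBStep (ansB, seen, counts) name).2.2 ∧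
    InvPS (solveAStep (ansA, prefixes, uniq) name).2.1 (solveBStep (ansB, seen, counts) name).2.1 := by
  obtain ⟨hnn, hiff, hcl⟩ := hinv
  subst hans
  subst huc
  have hfuel : (PySem.Str.len name - 1).toNat = name.toList.length - 1 := by
    rw [PySem.Str.len_eq]; omega
  simp only [solveAStep, solveBStep]
  rw [join_two, hfuel, A_inner_eq, B_inner_eq]
  set cs := name.toList with hcs
  set n := cs.length with hn
  set m := firstMiss name seen (n - 1) 1 with hm
  obtain ⟨hm1, hm2, hseen, hmiss⟩ := firstMiss_spec name seen (n - 1) 1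
  rw [← hm] at hm1 hm2 hseen hmiss
  -- every prefix of length ≥ m (and < n) is unseen, by prefix-closedness of `seen`
  have hm_unseen : ∀ k, m ≤ k → k < n → pfx cs k ∉ seen := by
    intro k hk1 hk2 hmem
    have hum : pfx cs m ∉ seen := hmiss (by omega)
    rcases Nat.eq_or_lt_of_le hk1 with he | hl
    · exact hum (he ▸ hmem)
    · have hlenk : (pfx cs k).toList.length = k := by
        rw [toList_pfx, List.length_take]; omega
      have hmem2 := hcl _ hmem m (by omega) (by omega)
      have hre : pfx (pfx cs k).toList m = pfx cs m := by
        rw [toList_pfx]; unfold pfx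
        rw [List.take_take, Nat.min_eq_left (by omega)]
      exact hum (hre ▸ hmem2)
  -- the emission test of A agrees with 'k < m' on the range of prefix lengths
  have hbound : ∀ k ∈ List.range' 1 (n - 1), 1 ≤ k ∧ k < n := by
    intro k hk
    have := List.mem_range'_1.mp hk
    omega
  obtain ⟨hA1, hA2⟩ := innerA cs (List.range' 1 (n - 1))
    (if uniq.getD name 0 > 0 then ansA ++ [name ++ " " ++ PySem.Int.toStr (uniq.getD name 0 + 1)] else ansA)
    prefixes hbound (List.nodup_range')
  have hfilter : (List.range' 1 (n - 1)).filter (fun k => prefixes.getD (pfx cs k) 0 == 0)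
      = List.range' m (n - m) := by
    have hsplit : List.range' 1 (n - 1) = List.range' 1 (m - 1) ++ List.range' m (n - m) := by
      have h := List.range'_append (s := 1) (m := m - 1) (n := n - m) (step := 1)
      rw [show 1 + 1 * (m - 1) = m by omega, show (m - 1) + (n - m) = n - 1 by omega] at h
      exact h.symm
    rw [hsplit, List.filter_append,
      List.filter_eq_nil_iff.mpr (fun k hk => by
        have hb := List.mem_range'_1.mp hk
        have : pfx cs k ∈ seen := hseen k (by omega) (by omega)
        have : 0 < prefixes.getD (pfx cs k) 0 := (hiff _).mpr this
        simp only [beq_iff_eq]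
        omega),
      List.filter_eq_self.mpr (fun k hk => by
        have hb := List.mem_range'_1.mp hk
        have : pfx cs k ∉ seen := hm_unseen k (by omega) (by omega)
        have h0 : ¬ 0 < prefixes.getD (pfx cs k) 0 := fun hlt => this ((hiff _).mp hlt)
        have := hnn (pfx cs k)
        simp only [beq_iff_eq]
        omega)]
    simp
  refine ⟨by rw [hA1, hfilter], trivial, ?_⟩
  dsimp only
  unfold InvPS ClosedSet
  refine ⟨?_, ?_, ?_⟩
  · -- values stay nonnegative
    intro s
    rw [hA2 s]
    have := hnn s
    omega
  · -- positive count in A's dict ↔ membership in B's seen set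
    intro s
    rw [hA2 s, PySem.Set.mem_update]
    have hcnt : 0 < ((List.range' 1 (n - 1)).map (pfx cs)).count s
        ↔ s ∈ (List.range' 1 (n - 1)).map (pfx cs) := List.count_pos_iff
    constructor
    · intro h
      by_cases hs : s ∈ seen
      · exact Or.inl hs
      · have hg : ¬ 0 < prefixes.getD s 0 := fun hlt => hs ((hiff s).mp hlt)
        have : 0 < ((List.range' 1 (n - 1)).map (pfx cs)).count s := by omega
        obtain ⟨k, hk, rfl⟩ := List.mem_map.mp (hcnt.mp this)
        have hb := List.mem_range'_1.mp hk
        by_cases hkm : k < m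
        · exact absurd (hseen k (by omega) hkm) hs
        · exact Or.inr (List.mem_map.mpr ⟨k, List.mem_range'_1.mpr ⟨by omega, by omega⟩, rfl⟩)
    · intro h
      rcases h with hs | hs
      · have := (hiff s).mpr hs
        have : (0:Int) ≤ ((List.range' 1 (n - 1)).map (pfx cs)).count s := by positivity
        omega
      · obtain ⟨k, hk, rfl⟩ := List.mem_map.mp hs
        have hb := List.mem_range'_1.mp hk
        have : 0 < ((List.range' 1 (n - 1)).map (pfx cs)).count (pfx cs k) :=
          hcnt.mpr (List.mem_map.mpr ⟨k, List.mem_range'_1.mpr ⟨by omega, by omega⟩, rfl⟩)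
        have := hnn (pfx cs k)
        omega
  · -- the new seen set is still prefix-closed
    intro s hs j hj1 hj2
    rw [PySem.Set.mem_update] at hs ⊢
    rcases hs with hs | hs
    · exact Or.inl (hcl s hs j hj1 hj2)
    · obtain ⟨k, hk, rfl⟩ := List.mem_map.mp hs
      have hb := List.mem_range'_1.mp hk
      have hkn : k < n := by omega
      have hlenk : (pfx cs k).toList.length = k := by
        rw [toList_pfx, List.length_take]; omega
      have hjk : j < k := by omega
      have hre : pfx (pfx cs k).toList j = pfx cs j := by
        rw [toList_pfx]; unfold pfx
        rw [List.take_take, Nat.min_eq_left (by omega)]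
      rw [hre]
      by_cases hjm : j < m
      · exact Or.inl (hseen j hj1 hjm)
      · exact Or.inr (List.mem_map.mpr ⟨j, List.mem_range'_1.mpr ⟨by omega, by omega⟩, rfl⟩)

-- ===== VERDICT (by name: the statement is the Claim_ definition above) =====
theorem solve_spec : Claim_equal_solve := by
  intro names hdom
  clear hdom
  unfold Spec_solve solve solve_alt
  suffices h : ∀ (ansA ansB : List String) (prefixes uniq counts : PySem.Dict String Int)
      (seen : PySem.Set String), ansA = ansB → uniq = counts → InvPS prefixes seen →
      (names.foldl solveAStep (ansA, prefixes, uniq)).1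
        = (names.foldl solveBStep (ansB, seen, counts)).1 by
    apply h _ _ _ _ _ _ rfl rfl
    refine ⟨fun s => by simp [PySem.Dict.getD_empty], fun s => ?_, fun s hs => by simp [PySem.Set.empty] at hs⟩
    simp [PySem.Dict.getD_empty, PySem.Set.empty]
  induction names with
  | nil => intro ansA ansB p u c seen h1 h2 _; simpa using h1
  | cons name rest ih =>
    intro ansA ansB p u c seen h1 h2 hinv
    obtain ⟨e1, e2, e3⟩ := step_rel name ansA ansB p u c seen h1 h2 hinv
    simp only [List.foldl_cons]
    exact ih (solveAStep (ansA, p, u) name).1 (solveBStep (ansB, seen, c) name).1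
      (solveAStep (ansA, p, u) name).2.1 (solveAStep (ansA, p, u) name).2.2
      (solveBStep (ansB, seen, c) name).2.2 (solveBStep (ansB, seen, c) name).2.1 e1 e2 e3
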